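-- pv_equiv track=rewrite | github.com/nexiusdev/linkedin-skills-suite | crm-integration/cli_sync.py | _find_prospect_by_name
-- ===== SOURCE A (Python) =====
-- def _find_prospect_by_name(prospects, name):
--     """Find a prospect by name (case-insensitive partial match)."""
--     name_lower = name.lower().strip()
--     # Exact match first
--     for p in prospects:
--         if p.get("Name", "").lower().strip() == name_lower:
--             return p
--     # Partial match
--     for p in prospects:
--         if name_lower in p.get("Name", "").lower():
--             return p
--     return None
-- ===== SOURCE B (Python) =====
-- def _find_prospect_by_name(prospects, name):
--     """Single pass: return on the first exact match, remember the first partial hit."""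
--     name_lower = name.lower().strip()
--     partial_hit = None
--     for p in prospects:
--         raw = p.get("Name", "")
--         if raw.lower().strip() == name_lower:
--             return p
--         if partial_hit is None and name_lower in raw.lower():
--             partial_hit = p
--     return partial_hit
-- ===== Notes on version B (the rewrite author's own statement) =====
-- stated objective: alternative
-- what changed: A's two sequential scans (exact scan, then a second partial scan) are folded into a single pass that returns immediately on an exact match and tracks the first partial hit in a candidate variable.
import Mathlib
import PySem

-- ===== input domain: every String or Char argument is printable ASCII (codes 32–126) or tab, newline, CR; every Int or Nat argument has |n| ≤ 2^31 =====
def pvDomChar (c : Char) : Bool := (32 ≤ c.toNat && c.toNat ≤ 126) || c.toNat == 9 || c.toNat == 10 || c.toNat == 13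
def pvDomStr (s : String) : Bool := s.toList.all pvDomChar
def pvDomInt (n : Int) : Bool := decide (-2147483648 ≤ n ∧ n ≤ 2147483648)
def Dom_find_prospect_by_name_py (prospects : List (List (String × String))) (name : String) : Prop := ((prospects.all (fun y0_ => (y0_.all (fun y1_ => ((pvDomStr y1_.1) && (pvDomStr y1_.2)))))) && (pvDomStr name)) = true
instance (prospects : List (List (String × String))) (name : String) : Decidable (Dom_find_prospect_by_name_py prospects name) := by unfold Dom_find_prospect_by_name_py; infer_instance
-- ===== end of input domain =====

-- B folds A's two sequential scans (exact, then partial) into one pass that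
-- returns on the first exact match and keeps the first partial hit as a candidate.

-- ===== PORT A =====
-- first loop of A: exact match on stripped lowered Name
def pvExactLoop (nl : String) : List (List (String × String)) → Option (List (String × String))
  | [] => none
  | p :: rest =>
    if PySem.Str.strip (PySem.Str.lower (PySem.Dict.getD (PySem.Dict.mk p) "Name" "")) = nl then some p
    else pvExactLoop nl rest

-- second loop of A: partial match (substring of lowered, unstripped Name)
def pvPartialLoop (nl : String) : List (List (String × String)) → Option (List (String × String))
  | [] => none
  | p :: rest =>
    if PySem.Str.isIn nl (PySem.Str.lower (PySem.Dict.getD (PySem.Dict.mk p) "Name" "")) then some p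
    else pvPartialLoop nl rest

def find_prospect_by_name_py (prospects : List (List (String × String))) (name : String) : Option (List (String × String)) :=
  let name_lower := PySem.Str.strip (PySem.Str.lower name)
  match pvExactLoop name_lower prospects with
  | some p => some p
  | none => pvPartialLoop name_lower prospects

-- ===== PORT B =====
-- single pass with a first-partial-hit candidate
def pvAltGo (nl : String) : List (List (String × String)) → Option (List (String × String)) → Option (List (String × String))
  | [], partial_hit => partial_hit
  | p :: rest, partial_hit =>
    let raw := PySem.Dict.getD (PySem.Dict.mk p) "Name" ""
    if PySem.Str.strip (PySem.Str.lower raw) = nl then some p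
    else pvAltGo nl rest
      (if partial_hit.isNone && PySem.Str.isIn nl (PySem.Str.lower raw) then some p else partial_hit)

def find_prospect_by_name_py_alt (prospects : List (List (String × String))) (name : String) : Option (List (String × String)) :=
  pvAltGo (PySem.Str.strip (PySem.Str.lower name)) prospects none

-- ===== PRECONDITION & SPEC =====
def Spec_find_prospect_by_name_py (prospects : List (List (String × String))) (name : String) (out : Option (List (String × String))) : Prop := out = find_prospect_by_name_py_alt prospects name
instance (prospects : List (List (String × String))) (name : String) (out : Option (List (String × String))) : Decidable (Spec_find_prospect_by_name_py prospects name out) := by unfold Spec_find_prospect_by_name_py; infer_instance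

-- ===== CLAIM (what is proved, stated in full; the proofs are below) =====
def Claim_equal_find_prospect_by_name_py : Prop := ∀ (prospects : List (List (String × String))) (name : String), Dom_find_prospect_by_name_py prospects name → Spec_find_prospect_by_name_py prospects name (find_prospect_by_name_py prospects name)

-- ===== LEMMAS AND PROOFS =====
-- Invariant of B's single pass: it finds the first exact match if any; otherwise it
-- returns the incoming candidate if set, else A's partial-scan result.
theorem pvAltGo_eq (nl : String) (l : List (List (String × String))) :
    ∀ cand : Option (List (String × String)),
      pvAltGo nl l cand =
        match pvExactLoop nl l with
        | some p => some p
        | none => match cand with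
          | some c => some c
          | none => pvPartialLoop nl l := by
  induction l with
  | nil => intro cand; cases cand <;> rfl
  | cons p rest ih =>
    intro cand
    simp only [pvAltGo, pvExactLoop, pvPartialLoop]
    by_cases hx : PySem.Str.strip (PySem.Str.lower (PySem.Dict.getD (PySem.Dict.mk p) "Name" "")) = nl
    · simp [hx]
    · cases cand with
      | some c => simp [hx, ih]
      | none =>
        simp [hx, ih]
        cases pvExactLoop nl rest <;> simp only
        by_cases hp : PySem.Chars.isIn nl.toList
            (PySem.Chars.lower (PySem.Dict.getD (PySem.Dict.mk p) "Name" "").toList) = true <;>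
          simp [hp]

-- ===== VERDICT (by name: the statement is the Claim_ definition above) =====
theorem find_prospect_by_name_py_spec : Claim_equal_find_prospect_by_name_py := by
  intro prospects name _
  unfold Spec_find_prospect_by_name_py find_prospect_by_name_py find_prospect_by_name_py_alt
  rw [pvAltGo_eq]
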